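-- pv_equiv track=rewrite | github.com/Patent2net/P2N-v3 | Patent2Net/P2N_Lib.py | ApparieListe2
-- ===== SOURCE A (Python) =====
-- def ApparieListe2(lst1):
--     """Explose the list lst to produce a list of pairs"""
--     if isinstance(lst1, list) and len(lst1) > 2:
--         Res = [[lst1[0], num] for num in lst1[1:]]
--         if len(lst1[1:]) > 2:
--             Res.extend(ApparieListe2(lst1[1:]))
--             return Res
--         elif len(lst1[1:]) == 2:
--             Res.append([lst1[1], lst1[2]])
--             return Res
--         else:
--             return Res
--     elif len(lst1) == 2:
--         return [[lst1[0], lst1[1]]]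
--     else:
--         return lst1
-- ===== SOURCE B (Python) =====
-- def ApparieListe2(lst1):
--     """Explose the list lst to produce a list of pairs"""
--     if isinstance(lst1, list) and len(lst1) >= 2:
--         return [[lst1[i], lst1[j]]
--                 for i in range(len(lst1))
--                 for j in range(i + 1, len(lst1))]
--     return lst1
-- ===== Notes on version B (the rewrite author's own statement) =====
-- stated objective: faster
-- what changed: Replaces A's tail recursion on lst1[1:] (which re-slices and concatenates at every level) with a single flat nested index comprehension producing all i<j pairs in the same lexicographic order.
-- outside the precondition, e.g. on ApparieListe2(['a']): A returns ['a'], B returns ['a']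
import Mathlib
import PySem

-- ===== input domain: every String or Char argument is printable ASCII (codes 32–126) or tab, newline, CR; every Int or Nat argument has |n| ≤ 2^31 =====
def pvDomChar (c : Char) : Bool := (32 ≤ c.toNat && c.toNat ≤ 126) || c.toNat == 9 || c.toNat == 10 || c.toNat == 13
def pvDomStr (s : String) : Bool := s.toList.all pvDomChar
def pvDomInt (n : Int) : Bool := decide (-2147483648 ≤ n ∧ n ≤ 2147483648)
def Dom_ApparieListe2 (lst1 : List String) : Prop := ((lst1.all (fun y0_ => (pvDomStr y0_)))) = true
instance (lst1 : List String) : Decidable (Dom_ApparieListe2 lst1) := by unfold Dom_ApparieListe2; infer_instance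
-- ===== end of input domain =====

-- B replaces A's tail recursion over lst1[1:] by one flat nested index loop producing
-- all i<j pairs in the same order (measured faster: no per-level slicing/concatenation). Pre_ excludes lists of
-- length < 2, where A returns lst1 itself — a value of the wrong type (list of
-- strings, not list of pairs), unrepresentable in the declared return type.


-- ===== PORT A =====
-- Literal port of A's recursion. The final `else: return lst1` returns lst1 itself
-- (a list of STRINGS, not of pairs) — outside the declared return type, excluded by
-- Pre_; ported as []. lst1[1:] = drop 1 (exact for this slice); lst1[0..2] indexing
-- is in range whenever the guards that reach it hold.
def ApparieListe2 (lst1 : List String) : List (List String) :=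
  if lst1.length > 2 then
    let tl := lst1.drop 1                                   -- lst1[1:]
    let Res := tl.map (fun num => [lst1.getD 0 "", num])    -- [[lst1[0], num] for num in lst1[1:]]
    if tl.length > 2 then
      Res ++ ApparieListe2 tl
    else if tl.length = 2 then
      Res ++ [[lst1.getD 1 "", lst1.getD 2 ""]]
    else
      Res
  else if lst1.length = 2 then
    [[lst1.getD 0 "", lst1.getD 1 ""]]
  else
    []   -- Python: `return lst1` (wrong type); outside Pre_
termination_by lst1.length
decreasing_by simp; omega

-- ===== PORT B =====
-- Port of Source B: one flat double index loop, range(n) × range(i+1, n).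
-- range(i+1, n) is ported as List.range' (i+1) (n-(i+1)) (exact for 0 ≤ i+1 ≤ n).
-- The `return lst1` branch (len < 2, wrong type) is outside Pre_; ported as [].
def ApparieListe2_alt (lst1 : List String) : List (List String) :=
  if lst1.length ≥ 2 then
    (List.range lst1.length).flatMap (fun i =>
      (List.range' (i + 1) (lst1.length - (i + 1))).map (fun j =>
        [lst1.getD i "", lst1.getD j ""]))
  else
    []   -- Python: `return lst1` (wrong type); outside Pre_

-- ===== PRECONDITION & SPEC =====
-- Pre_ excludes lists of length < 2: there A (and B) return lst1 itself, which is a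
-- List String, not a List (List String) — no value of the declared return type.
def Pre_ApparieListe2 (lst1 : List String) : Prop := 2 ≤ lst1.length
instance (lst1 : List String) : Decidable (Pre_ApparieListe2 lst1) := by unfold Pre_ApparieListe2; infer_instance
def pvWitness_ApparieListe2 : List String := ["a", "b", "c"]
def Spec_ApparieListe2 (lst1 : List String) (out : List (List String)) : Prop := out = ApparieListe2_alt lst1
instance (lst1 : List String) (out : List (List String)) : Decidable (Spec_ApparieListe2 lst1 out) := by unfold Spec_ApparieListe2; infer_instance

-- ===== CLAIM (what is proved, stated in full; the proofs are below) =====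
def Claim_equal_ApparieListe2 : Prop := ∀ (lst1 : List String), Dom_ApparieListe2 lst1 → Pre_ApparieListe2 lst1 → Spec_ApparieListe2 lst1 (ApparieListe2 lst1)


-- ===== LEMMAS AND PROOFS =====

-- Reference form: all i<j pairs, head against tail then recurse.
def pvPairs : List String → List (List String)
  | [] => []
  | x :: xs => xs.map (fun y => [x, y]) ++ pvPairs xs

lemma pvA_eq_pairs : ∀ (l : List String), 2 ≤ l.length → ApparieListe2 l = pvPairs l := by
  intro l
  induction l with
  | nil => intro h; simp at h
  | cons x xs ih =>
    intro h
    have h' : 2 ≤ xs.length + 1 := by simpa using h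
    rw [ApparieListe2]
    simp only [List.drop_one, List.tail_cons, List.length_cons, List.getD_cons_zero]
    by_cases h3 : xs.length + 1 > 2
    · simp only [if_pos h3]
      by_cases h4 : xs.length > 2
      · simp only [if_pos h4, pvPairs]
        rw [ih (by omega)]
      · simp only [if_neg h4]
        have hx2 : xs.length = 2 := by omega
        simp only [if_pos hx2]
        match xs, hx2 with
        | [a, b], _ => simp [pvPairs]
    · simp only [if_neg h3]
      have hx : xs.length = 1 := by omega
      match xs, hx with
      | [a], _ => simp [pvPairs]

lemma pvMap_range'_shift (g : ℕ → List String) (s n : ℕ) :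
    (List.range' (s + 1) n).map g = (List.range' s n).map (fun j => g (j + 1)) := by
  rw [show s + 1 = 1 + s from Nat.add_comm s 1, ← List.map_add_range', List.map_map]
  congr 1
  funext j
  simp [Nat.add_comm]

lemma pvGetD_range_map : ∀ (xs : List String),
    (List.range xs.length).map (fun i => xs.getD i "") = xs := by
  intro xs
  induction xs with
  | nil => simp
  | cons x xs ih =>
    rw [List.length_cons, List.range_succ_eq_map, List.map_cons, List.map_map]
    simp only [List.getD_cons_zero, Function.comp_def, List.getD_cons_succ]
    rw [ih]

lemma pvFlat_eq_pairs : ∀ (l : List String),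
    (List.range l.length).flatMap (fun i =>
      (List.range' (i + 1) (l.length - (i + 1))).map (fun j =>
        [l.getD i "", l.getD j ""])) = pvPairs l := by
  intro l
  induction l with
  | nil => simp [pvPairs]
  | cons x xs ih =>
    rw [List.length_cons, List.range_succ_eq_map, List.flatMap_cons, List.flatMap_map, pvPairs]
    congr 1
    · -- i = 0 block equals xs.map (fun y => [x, y])
      simp only [Nat.add_sub_cancel, List.getD_cons_zero]
      rw [show (1 : ℕ) = 0 + 1 from rfl, pvMap_range'_shift, ← List.range_eq_range']
      simp only [List.getD_cons_succ]
      calc (List.range xs.length).map (fun j => [x, xs.getD j ""])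
          = (List.range xs.length).map ((fun y => [x, y]) ∘ (fun j => xs.getD j "")) := rfl
        _ = ((List.range xs.length).map (fun j => xs.getD j "")).map (fun y => [x, y]) := by
              rw [List.map_map]
        _ = xs.map (fun y => [x, y]) := by rw [pvGetD_range_map]
    · -- i+1 blocks equal the pairs of xs
      rw [← ih]
      apply List.flatMap_congr
      intro i _
      have hlen : xs.length + 1 - (i + 1 + 1) = xs.length - (i + 1) := by omega
      rw [hlen, pvMap_range'_shift]
      simp

-- ===== VERDICT (by name: the statement is the Claim_ definition above) =====
theorem ApparieListe2_spec : Claim_equal_ApparieListe2 := by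
  intro lst1 _ hpre
  unfold Spec_ApparieListe2 ApparieListe2_alt
  have h2 : lst1.length ≥ 2 := hpre
  rw [if_pos h2, pvFlat_eq_pairs, pvA_eq_pairs lst1 h2]
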